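-- pv_equiv track=rewrite | github.com/pborenstein/obsidian-tag-tools | tagex/core/operations/add_tags.py | _append_to_tags_field
-- ===== SOURCE A (Python) =====
-- from typing import List, Dict, Any
--
-- def _append_to_tags_field(yaml_content: str, new_tags: List[str]) -> str:
--     """
--     Append tags to existing tags field in YAML.
--
--     Args:
--         yaml_content: Current YAML content
--         new_tags: Tags to append
--
--     Returns:
--         Updated YAML content
--     """
--     lines = yaml_content.split('\n')
--     updated_lines = []
--     i = 0
--     tags_field_found = False
--
--     while i < len(lines):
--         line = lines[i]
--         stripped = line.strip()
--
--         # Check if this is the tags field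
--         if stripped.startswith('tags:') or stripped.startswith('tag:'):
--             # Detect duplicate tags: fields (invalid YAML)
--             if tags_field_found:
--                 # Skip duplicate tags: field - don't copy it
--                 # If it has values, we need to skip those too
--                 value_part = line.split(':', 1)[1].strip() if len(line.split(':', 1)) > 1 else ''
--                 if not value_part:
--                     # Multi-line format - skip array items
--                     i += 1
--                     while i < len(lines) and (lines[i].strip().startswith('- ') or lines[i].strip() == ''):
--                         i += 1
--                     i -= 1  # Back up since we'll increment at end of loop
--                 # If inline format, just skip the line (which happens by not adding to updated_lines)
--             else:
--                 # First tags: field - update it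
--                 tags_field_found = True
--                 key_part = line.split(':', 1)[0] + ':'
--                 value_part = line.split(':', 1)[1].strip() if len(line.split(':', 1)) > 1 else ''
--                 indent = line[:len(line) - len(line.lstrip())]
--
--                 if value_part:
--                     # Inline format: tags: [tag1, tag2] or tags: tag1
--                     if value_part.startswith('[') and value_part.endswith(']'):
--                         # Array format - append to array
--                         inner = value_part[1:-1]
--                         existing_tags = [t.strip().strip('"\'') for t in inner.split(',') if t.strip()]
--                         all_tags = existing_tags + new_tags
--                         updated_lines.append(f"{indent}{key_part} [{', '.join(all_tags)}]")
--                     else: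
--                         # Convert single tag to array with new tags
--                         existing_tag = value_part.strip().strip('"\'')
--                         all_tags = [existing_tag] + new_tags
--                         updated_lines.append(f"{indent}{key_part} [{', '.join(all_tags)}]")
--                 else:
--                     # Multi-line array format
--                     updated_lines.append(line)  # Keep the "tags:" line
--
--                     # Copy existing array items
--                     i += 1
--                     while i < len(lines) and (lines[i].strip().startswith('- ') or lines[i].strip() == ''):
--                         updated_lines.append(lines[i])
--                         i += 1
--
--                     # Add new tags as array items
--                     array_indent = indent + "  "
--                     for tag in new_tags:
--                         updated_lines.append(f"{array_indent}- {tag}")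
--
--                     i -= 1  # Back up since we'll increment at end of loop
--         else:
--             updated_lines.append(line)
--
--         i += 1
--
--     return '\n'.join(updated_lines)
-- ===== SOURCE B (Python) =====
-- from typing import List
--
--
-- def _handle_line(line, new_tags, found, out):
--     """Process one line in NORMAL mode; return (mode, indent, found).
--
--     mode is 'N' (normal), 'C' (copying a multi-line tags array),
--     or 'S' (skipping a duplicate multi-line tags array)."""
--     stripped = line.strip()
--     if not (stripped.startswith('tags:') or stripped.startswith('tag:')):
--         out.append(line)
--         return 'N', '', found
--     parts = line.split(':', 1)
--     value = parts[1].strip() if len(parts) > 1 else ''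
--     if found:
--         # duplicate tags field: drop it (and its items when multi-line)
--         return ('S' if not value else 'N'), '', found
--     indent = line[:len(line) - len(line.lstrip())]
--     key = parts[0] + ':'
--     if not value:
--         out.append(line)
--         return 'C', indent, True
--     if value.startswith('[') and value.endswith(']'):
--         existing = [t.strip().strip('"\'') for t in value[1:-1].split(',') if t.strip()]
--     else:
--         existing = [value.strip().strip('"\'')]
--     out.append(f"{indent}{key} [{', '.join(existing + new_tags)}]")
--     return 'N', '', True
--
--
-- def _append_to_tags_field(yaml_content: str, new_tags: List[str]) -> str:
--     out = []
--     mode, indent, found = 'N', '', False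
--     for line in yaml_content.split('\n'):
--         s = line.strip()
--         if mode != 'N':
--             if s.startswith('- ') or s == '':
--                 if mode == 'C':
--                     out.append(line)
--                 continue
--             if mode == 'C':
--                 out.extend(f"{indent}  - {t}" for t in new_tags)
--             mode, indent, found = _handle_line(line, new_tags, found, out)
--         else:
--             mode, indent, found = _handle_line(line, new_tags, found, out)
--     if mode == 'C':
--         out.extend(f"{indent}  - {t}" for t in new_tags)
--     return '\n'.join(out)
-- ===== Notes on version B (the rewrite author's own statement) =====
-- stated objective: simpler
-- what changed: Replaced A's outer while loop with index-advancing inner while loops and `i -= 1` backtracking by a single flat pass over the lines driven by a three-value state (normal / copying the first multi-line tags array / skipping a duplicate one), flushing the new tag items when the array ends or at EOF.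
import Mathlib
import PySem

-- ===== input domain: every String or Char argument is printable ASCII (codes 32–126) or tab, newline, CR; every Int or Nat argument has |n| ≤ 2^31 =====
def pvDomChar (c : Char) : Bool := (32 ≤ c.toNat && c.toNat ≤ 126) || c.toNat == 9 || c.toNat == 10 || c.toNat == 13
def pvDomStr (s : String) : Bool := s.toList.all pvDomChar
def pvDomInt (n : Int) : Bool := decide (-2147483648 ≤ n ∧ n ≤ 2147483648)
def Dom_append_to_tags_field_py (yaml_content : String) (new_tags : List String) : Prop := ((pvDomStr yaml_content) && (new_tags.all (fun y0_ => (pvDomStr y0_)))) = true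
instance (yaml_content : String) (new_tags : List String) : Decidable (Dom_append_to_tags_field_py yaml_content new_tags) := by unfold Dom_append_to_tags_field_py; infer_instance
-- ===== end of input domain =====

-- B rewrites A's outer loop with index-advancing inner while loops and `i -= 1`
-- backtracking as a single flat pass driven by a three-value state (normal /
-- copying a multi-line array / skipping a duplicate one); objective: simpler.

-- ===== PORT A =====
-- "lines[i].strip().startswith('- ') or lines[i].strip() == ''" (A's inner-loop test)
def pvItemA (s : String) : Bool :=
  PySem.Str.startswith (PySem.Str.strip s) "- " || PySem.Str.strip s == ""

-- inner while of the duplicate branch: advance i past array items / blank lines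
def skipA (lines : List String) (i : Nat) : Nat :=
  if h : i < lines.length ∧ pvItemA (lines.getD i "") = true then skipA lines (i + 1) else i
termination_by lines.length - i
decreasing_by have := h.1; omega

theorem skipA_ge (lines : List String) (i : Nat) : i ≤ skipA lines i := by
  unfold skipA
  split
  · have := skipA_ge lines (i + 1); omega
  · exact le_refl i
termination_by lines.length - i
decreasing_by rename_i h; have := h.1; omega

-- inner while of the first-field branch: copy array items / blank lines
def copyA (lines : List String) (i : Nat) (acc : List String) : List String × Nat :=
  if h : i < lines.length ∧ pvItemA (lines.getD i "") = true then
    copyA lines (i + 1) (acc ++ [lines.getD i ""])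
  else (acc, i)
termination_by lines.length - i
decreasing_by have := h.1; omega

theorem copyA_snd_ge (lines : List String) (i : Nat) (acc : List String) :
    i ≤ (copyA lines i acc).2 := by
  unfold copyA
  split
  · have := copyA_snd_ge lines (i + 1) (acc ++ [lines.getD i ""]); omega
  · exact le_refl i
termination_by lines.length - i
decreasing_by rename_i h; have := h.1; omega

-- the outer while of A, transliterated with the same index arithmetic
def loopA (new_tags : List String) (lines : List String) (i : Nat) (found : Bool)
    (acc : List String) : List String :=
  if hi : i < lines.length then
    let line := lines.getD i ""
    let stripped := PySem.Str.strip line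
    if PySem.Str.startswith stripped "tags:" || PySem.Str.startswith stripped "tag:" then
      let parts := (PySem.Str.splitMax? line ":" 1).getD []
      let value_part := if parts.length > 1 then PySem.Str.strip (parts.getD 1 "") else ""
      if found then
        if value_part == "" then
          loopA new_tags lines (skipA lines (i + 1) - 1 + 1) found acc
        else
          loopA new_tags lines (i + 1) found acc
      else
        let key_part := parts.getD 0 "" ++ ":"
        let indent := PySem.Str.slice line none
          (some (PySem.Str.len line - PySem.Str.len (PySem.Str.lstrip line)))
        if !(value_part == "") then
          if PySem.Str.startswith value_part "[" && PySem.Str.endswith value_part "]" then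
            let inner := PySem.Str.slice value_part (some 1) (some (-1))
            let existing := (((PySem.Str.split? inner ",").getD []).filter
                (fun t => !(PySem.Str.strip t == ""))).map
                (fun t => PySem.Str.stripChars (PySem.Str.strip t) "\"'")
            loopA new_tags lines (i + 1) true
              (acc ++ [indent ++ key_part ++ " [" ++
                PySem.Str.join ", " (existing ++ new_tags) ++ "]"])
          else
            let existing_tag := PySem.Str.stripChars (PySem.Str.strip value_part) "\"'"
            loopA new_tags lines (i + 1) true
              (acc ++ [indent ++ key_part ++ " [" ++
                PySem.Str.join ", " ([existing_tag] ++ new_tags) ++ "]"])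
        else
          let res := copyA lines (i + 1) (acc ++ [line])
          let acc2 := res.1 ++ new_tags.map (fun tag => indent ++ "  " ++ ("- " ++ tag))
          loopA new_tags lines (res.2 - 1 + 1) true acc2
    else
      loopA new_tags lines (i + 1) found (acc ++ [line])
  else acc
termination_by lines.length - i
decreasing_by
  · have := skipA_ge lines (i + 1); omega
  · omega
  · omega
  · omega
  · have := copyA_snd_ge lines (i + 1) (acc ++ [lines.getD i ""]); omega
  · omega

def append_to_tags_field_py (yaml_content : String) (new_tags : List String) : String :=
  PySem.Str.join "\n" (loopA new_tags ((PySem.Str.split? yaml_content "\n").getD []) 0 false [])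

-- ===== PORT B =====
inductive PvMode where
  | normal | copy | skip

-- "line.strip().startswith('- ') or line.strip() == ''" (B's array-item test)
def pvItemB (s : String) : Bool :=
  PySem.Str.startswith (PySem.Str.strip s) "- " || PySem.Str.strip s == ""

-- _handle_line: process one NORMAL-mode line; returns (out, mode, pending indent, found)
def handleB (new_tags : List String) (line : String) (found : Bool) (out : List String) :
    List String × PvMode × String × Bool :=
  let stripped := PySem.Str.strip line
  if !(PySem.Str.startswith stripped "tags:" || PySem.Str.startswith stripped "tag:") then
    (out ++ [line], .normal, "", found)
  else
    let parts := (PySem.Str.splitMax? line ":" 1).getD []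
    let value := if parts.length > 1 then PySem.Str.strip (parts.getD 1 "") else ""
    if found then
      (out, if value == "" then .skip else .normal, "", found)
    else
      let indent := PySem.Str.slice line none
        (some (PySem.Str.len line - PySem.Str.len (PySem.Str.lstrip line)))
      let key := parts.getD 0 "" ++ ":"
      if value == "" then
        (out ++ [line], .copy, indent, true)
      else
        let existing :=
          if PySem.Str.startswith value "[" && PySem.Str.endswith value "]" then
            (((PySem.Str.split? (PySem.Str.slice value (some 1) (some (-1))) ",").getD []).filter
              (fun t => !(PySem.Str.strip t == ""))).map
              (fun t => PySem.Str.stripChars (PySem.Str.strip t) "\"'")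
          else [PySem.Str.stripChars (PySem.Str.strip value) "\"'"]
        (out ++ [indent ++ key ++ " [" ++
          PySem.Str.join ", " (existing ++ new_tags) ++ "]"], .normal, "", true)

-- the single flat pass of B
def loopB (new_tags : List String) : List String → PvMode → String → Bool → List String →
    List String
  | [], .copy, indent, _, out => out ++ new_tags.map (fun t => indent ++ ("  - " ++ t))
  | [], _, _, _, out => out
  | line :: rest, .normal, _, found, out =>
      let r := handleB new_tags line found out
      loopB new_tags rest r.2.1 r.2.2.1 r.2.2.2 r.1
  | line :: rest, .copy, indent, found, out =>
      if pvItemB line then loopB new_tags rest .copy indent found (out ++ [line])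
      else
        let r := handleB new_tags line found
          (out ++ new_tags.map (fun t => indent ++ ("  - " ++ t)))
        loopB new_tags rest r.2.1 r.2.2.1 r.2.2.2 r.1
  | line :: rest, .skip, indent, found, out =>
      if pvItemB line then loopB new_tags rest .skip indent found out
      else
        let r := handleB new_tags line found out
        loopB new_tags rest r.2.1 r.2.2.1 r.2.2.2 r.1

def append_to_tags_field_py_alt (yaml_content : String) (new_tags : List String) : String :=
  PySem.Str.join "\n" (loopB new_tags ((PySem.Str.split? yaml_content "\n").getD []) .normal "" false [])

-- ===== PRECONDITION & SPEC =====
def Spec_append_to_tags_field_py (yaml_content : String) (new_tags : List String) (out : String) : Prop := out = append_to_tags_field_py_alt yaml_content new_tags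
instance (yaml_content : String) (new_tags : List String) (out : String) : Decidable (Spec_append_to_tags_field_py yaml_content new_tags out) := by unfold Spec_append_to_tags_field_py; infer_instance

-- ===== CLAIM (what is proved, stated in full; the proofs are below) =====
def Claim_equal_append_to_tags_field_py : Prop := ∀ (yaml_content : String) (new_tags : List String), Dom_append_to_tags_field_py yaml_content new_tags → Spec_append_to_tags_field_py yaml_content new_tags (append_to_tags_field_py yaml_content new_tags)

-- ===== LEMMAS AND PROOFS =====

theorem pv_drop_takeWhile (l : List String) (p : String → Bool) :
    l.drop (l.takeWhile p).length = l.dropWhile p := by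
  induction l with
  | nil => rfl
  | cons a t ih => by_cases h : p a <;> simp [h, ih]

theorem pv_dash_append (ind t : String) :
    ind ++ "  " ++ ("- " ++ t) = ind ++ ("  - " ++ t) := by
  rw [String.append_assoc, ← String.append_assoc (s₁ := "  ") (s₂ := "- ") (s₃ := t),
    show ("  " : String) ++ "- " = "  - " from rfl]

theorem skipA_eq (lines : List String) (i : Nat) :
    skipA lines i = i + ((lines.drop i).takeWhile pvItemA).length := by
  unfold skipA
  split
  · rename_i h
    obtain ⟨h1, h2⟩ := h
    rw [List.getD_eq_getElem lines "" h1] at h2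
    rw [skipA_eq lines (i + 1), List.drop_eq_getElem_cons h1, List.takeWhile_cons_of_pos h2]
    simp; omega
  · rename_i h
    rcases Nat.lt_or_ge i lines.length with h1 | h1
    · have h2 : ¬ pvItemA (lines.getD i "") = true := fun hh => h ⟨h1, hh⟩
      rw [List.getD_eq_getElem lines "" h1] at h2
      rw [List.drop_eq_getElem_cons h1, List.takeWhile_cons_of_neg (by simpa using h2)]
      simp
    · rw [List.drop_eq_nil_of_le h1]; simp
termination_by lines.length - i
decreasing_by omega

theorem copyA_eq (lines : List String) (i : Nat) (acc : List String) :
    copyA lines i acc = (acc ++ (lines.drop i).takeWhile pvItemA,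
      i + ((lines.drop i).takeWhile pvItemA).length) := by
  unfold copyA
  split
  · rename_i h
    obtain ⟨h1, h2⟩ := h
    rw [List.getD_eq_getElem lines "" h1] at h2 ⊢
    rw [copyA_eq lines (i + 1) _, List.drop_eq_getElem_cons h1, List.takeWhile_cons_of_pos h2]
    simp; omega
  · rename_i h
    rcases Nat.lt_or_ge i lines.length with h1 | h1
    · have h2 : ¬ pvItemA (lines.getD i "") = true := fun hh => h ⟨h1, hh⟩
      rw [List.getD_eq_getElem lines "" h1] at h2
      rw [List.drop_eq_getElem_cons h1, List.takeWhile_cons_of_neg (by simpa using h2)]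
      simp
    · rw [List.drop_eq_nil_of_le h1]; simp
termination_by lines.length - i
decreasing_by omega

theorem loopB_normal_ind (nt rest : List String) (ind : String) (f : Bool)
    (out : List String) :
    loopB nt rest .normal ind f out = loopB nt rest .normal "" f out := by
  cases rest <;> rfl

theorem loopB_skip (nt : List String) (rest : List String) (ind : String) (f : Bool)
    (out : List String) :
    loopB nt rest .skip ind f out =
      loopB nt (rest.dropWhile pvItemB) .normal ind f out := by
  induction rest generalizing out with
  | nil => rfl
  | cons a t ih =>
    by_cases h : pvItemB a
    · simp only [loopB, h, if_pos, List.dropWhile_cons, ih]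
    · simp only [loopB, h, List.dropWhile_cons, Bool.false_eq_true, ite_false]

theorem loopB_copy (nt : List String) (rest : List String) (ind : String) (f : Bool)
    (out : List String) :
    loopB nt rest .copy ind f out =
      loopB nt (rest.dropWhile pvItemB) .normal ind f
        (out ++ rest.takeWhile pvItemB ++ nt.map (fun t => ind ++ ("  - " ++ t))) := by
  induction rest generalizing out with
  | nil => simp [loopB]
  | cons a t ih =>
    by_cases h : pvItemB a
    · simp only [loopB, h, if_pos, List.dropWhile_cons, List.takeWhile_cons, ih]
      simp [List.append_assoc]
    · simp only [loopB, h, List.dropWhile_cons, List.takeWhile_cons,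
        Bool.false_eq_true, ite_false]
      simp

theorem main_lemma (new_tags lines : List String) (i : Nat) (found : Bool)
    (acc : List String) :
    loopA new_tags lines i found acc =
      loopB new_tags (lines.drop i) .normal "" found acc := by
  rw [loopA]
  split
  · rename_i hi
    rw [List.drop_eq_getElem_cons hi, List.getD_eq_getElem lines "" hi]
    simp only [loopB]
    by_cases htag : (PySem.Str.startswith (PySem.Str.strip lines[i]) "tags:"
        || PySem.Str.startswith (PySem.Str.strip lines[i]) "tag:") = true
    · simp only [handleB, htag, Bool.not_true, Bool.false_eq_true, ite_false]
      by_cases hv : ((if ((PySem.Str.splitMax? lines[i] ":" 1).getD []).length > 1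
          then PySem.Str.strip (((PySem.Str.splitMax? lines[i] ":" 1).getD []).getD 1 "")
          else "") == "") = true
      · cases found
        · -- first tags field, multi-line format
          simp only [hv, Bool.not_true, Bool.false_eq_true, ite_false, ite_true]
          rw [copyA_eq]
          rw [show i + 1 + ((lines.drop (i + 1)).takeWhile pvItemA).length - 1 + 1
              = i + 1 + ((lines.drop (i + 1)).takeWhile pvItemA).length by omega]
          rw [main_lemma new_tags lines (i + 1 + ((lines.drop (i + 1)).takeWhile pvItemA).length)
            true _]
          rw [loopB_copy, loopB_normal_ind]
          rw [show pvItemB = pvItemA from rfl, ← pv_drop_takeWhile (lines.drop (i + 1)) pvItemA,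
            List.drop_drop]
          simp only [pv_dash_append, List.append_assoc]
          conv_rhs => rw [loopB_normal_ind]
        · -- duplicate tags field, multi-line format
          simp only [hv, Bool.not_true, Bool.false_eq_true, ite_false, ite_true]
          have hge := skipA_ge lines (i + 1)
          rw [show skipA lines (i + 1) - 1 + 1 = skipA lines (i + 1) by omega]
          rw [main_lemma new_tags lines (skipA lines (i + 1)) true acc]
          rw [loopB_skip, skipA_eq]
          rw [show pvItemB = pvItemA from rfl, ← pv_drop_takeWhile (lines.drop (i + 1)) pvItemA]
          rw [List.drop_drop]
      · cases found
        · -- first tags field, inline format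
          simp only [hv, Bool.false_eq_true, ite_false, Bool.not_false, ite_true]
          by_cases harr : (PySem.Str.startswith (if ((PySem.Str.splitMax? lines[i] ":" 1).getD []).length > 1
              then PySem.Str.strip (((PySem.Str.splitMax? lines[i] ":" 1).getD []).getD 1 "")
              else "") "[" && PySem.Str.endswith (if ((PySem.Str.splitMax? lines[i] ":" 1).getD []).length > 1
              then PySem.Str.strip (((PySem.Str.splitMax? lines[i] ":" 1).getD []).getD 1 "")
              else "") "]") = true
          · simp only [harr, ite_true]
            exact main_lemma new_tags lines (i + 1) true _
          · simp only [harr, Bool.false_eq_true, ite_false]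
            exact main_lemma new_tags lines (i + 1) true _
        · -- duplicate inline tags field: dropped
          simp only [hv, Bool.false_eq_true, ite_false, ite_true]
          exact main_lemma new_tags lines (i + 1) true acc
    · simp only [handleB, Bool.not_eq_true] at *
      simp only [htag, Bool.not_false, ite_true]
      exact main_lemma new_tags lines (i + 1) found (acc ++ [lines[i]])
  · rename_i hi
    rw [List.drop_eq_nil_of_le (by omega)]
    rfl
termination_by lines.length - i
decreasing_by all_goals omega

-- ===== VERDICT (by name: the statement is the Claim_ definition above) =====
theorem append_to_tags_field_py_spec : Claim_equal_append_to_tags_field_py := by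
  intro yaml_content new_tags _
  unfold Spec_append_to_tags_field_py append_to_tags_field_py append_to_tags_field_py_alt
  rw [main_lemma, List.drop_zero]
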